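-- pv_equiv track=rewrite | github.com/matt-j-harvey/Widefield_Analysis | Movement_Controls/Ridige_Regression/Ridge_Regression_Model.py | match_frames
-- ===== SOURCE A (Python) =====
-- from bisect import bisect_left
--
-- def take_closest(myList, myNumber):
--
--     """
--     Assumes myList is sorted. Returns closest value to myNumber.
--     If two numbers are equally close, return the smallest number.
--     """
--
--     pos = bisect_left(myList, myNumber)
--     if pos == 0:
--         return myList[0]
--     if pos == len(myList):
--         return myList[-1]
--     before = myList[pos - 1]
--     after = myList[pos]
--     if after - myNumber < myNumber - before:
--         return after
--     else:
--         return before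
--
-- def match_frames(mousecam_onsets, frame_times):
--
--     frame_onsets = list(frame_times.keys())
--     mousecam_widefield_matching_dict = {}
--
--     number_of_mousecam_onsets = len(mousecam_onsets)
--     for mousecam_frame_index in range(number_of_mousecam_onsets):
--         mousecam_frame_time = mousecam_onsets[mousecam_frame_index]
--
--         nearest_widefield_frame_time = take_closest(frame_onsets, mousecam_frame_time)
--         nearest_widefield_frame_index = frame_times[nearest_widefield_frame_time]
--
--         mousecam_widefield_matching_dict[mousecam_frame_index] = nearest_widefield_frame_index
--
--     return mousecam_widefield_matching_dict
-- ===== SOURCE B (Python) =====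
-- def _lower(keys, t, lo, hi):
--     # recursive lower-bound search: first position where keys[mid] < t fails to push lo past it
--     if lo >= hi:
--         return lo
--     mid = (lo + hi) // 2
--     if keys[mid] < t:
--         return _lower(keys, t, mid + 1, hi)
--     return _lower(keys, t, lo, mid)
--
-- def match_frames(mousecam_onsets, frame_times):
--     keys = list(frame_times)
--     vals = list(frame_times.values())
--     last = len(keys) - 1
--
--     def nearest(t):
--         p = _lower(keys, t, 0, len(keys))
--         b, a = max(p - 1, 0), min(p, last)
--         # branch-free neighbour pick: t strictly above the midpoint of the two
--         # clamped neighbours selects the upper one (edges collapse to b == a)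
--         return vals[a] if keys[b] + keys[a] < 2 * t else vals[b]
--
--     return {i: nearest(t) for i, t in enumerate(mousecam_onsets)}
-- ===== Notes on version B (the rewrite author's own statement) =====
-- stated objective: alternative
-- what changed: Replaces the bisect-library call and the take_closest helper's four-way early-return chain with a hand-written recursive lower-bound search plus one branch-free selection (clamp both neighbour indices with max/min, pick the upper one iff t lies strictly above their midpoint, edges collapsing to a single candidate), reads the matched value positionally from a values list instead of a dict lookup, and builds the result as a dict comprehension over enumerate.
import Mathlib
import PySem

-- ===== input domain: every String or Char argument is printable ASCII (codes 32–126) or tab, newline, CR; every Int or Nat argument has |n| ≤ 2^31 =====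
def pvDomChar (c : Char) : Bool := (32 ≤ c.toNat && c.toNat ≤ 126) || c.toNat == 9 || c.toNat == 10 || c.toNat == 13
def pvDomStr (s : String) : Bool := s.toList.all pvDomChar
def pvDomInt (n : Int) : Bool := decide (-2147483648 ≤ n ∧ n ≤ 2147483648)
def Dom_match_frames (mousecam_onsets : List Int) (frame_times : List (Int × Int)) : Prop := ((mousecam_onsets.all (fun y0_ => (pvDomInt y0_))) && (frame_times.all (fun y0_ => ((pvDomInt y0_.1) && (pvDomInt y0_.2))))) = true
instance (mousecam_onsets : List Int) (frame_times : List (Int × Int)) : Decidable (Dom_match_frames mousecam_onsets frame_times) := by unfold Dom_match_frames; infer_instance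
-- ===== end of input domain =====

-- B replaces the bisect call and take_closest's branch chain with a recursive lower-bound
-- search and one branch-free clamped midpoint selection over a positional values list
-- (objective: alternative).


-- ===== PORT A =====
-- take_closest: Option = raised IndexError (myList[0] / myList[-1] on an empty list).
def takeClosest (myList : List Int) (myNumber : Int) : Option Int :=
  let pos := PySem.List.bisectLeft myList myNumber
  if pos = 0 then PySem.List.pyGet? myList 0
  else if pos = myList.length then PySem.List.pyGet? myList (-1)
  else
    match PySem.List.pyGet? myList ((pos : Int) - 1), PySem.List.pyGet? myList (pos : Int) with
    | some before, some after =>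
        if after - myNumber < myNumber - before then some after else some before
    | _, _ => none

-- frame_times[nearest] is ported as getD _ 0: under Pre_ the key is always present
-- (take_closest returns an element of the key list), so the default is never read.
def match_frames (mousecam_onsets : List Int) (frame_times : List (Int × Int)) : List (Int × Int) :=
  let ftd : PySem.Dict Int Int := PySem.Dict.mk frame_times
  let frame_onsets := PySem.Dict.keys ftd
  ((PySem.List.pyRange 0 (PySem.List.len mousecam_onsets) 1).foldl
    (fun (d : PySem.Dict Int Int) i =>
      let t := PySem.List.pyGetD mousecam_onsets i 0
      match takeClosest frame_onsets t with
      | some nearest => d.insert i (ftd.getD nearest 0)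
      | none => d)
    PySem.Dict.empty).items

-- ===== PORT B =====
-- _lower: the recursive lower-bound search of Source B (keys[mid] is in range whenever
-- lo < hi ≤ len keys, so getD's default is never read).
def lowerRec (keys : List Int) (t : Int) (lo hi : Nat) : Nat :=
  if h : lo < hi then
    let mid := (lo + hi) / 2
    if keys.getD mid 0 < t then lowerRec keys t (mid + 1) hi else lowerRec keys t lo mid
  else lo
termination_by hi - lo
decreasing_by · omega
              · omega

-- keys[b] / vals[a] are ported as pyGetD _ _ 0: under Pre_ the clamped indices are in
-- range whenever the comprehension body runs (keys nonempty), so the default is never read.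
def match_frames_alt (mousecam_onsets : List Int) (frame_times : List (Int × Int)) : List (Int × Int) :=
  let ftd : PySem.Dict Int Int := PySem.Dict.mk frame_times
  let keys := PySem.Dict.keys ftd
  let vals := PySem.Dict.values ftd
  let last : Int := (keys.length : Int) - 1
  ((PySem.List.enumerate mousecam_onsets).foldl
    (fun (d : PySem.Dict Int Int) p =>
      let pos := lowerRec keys p.2 0 keys.length
      let b : Int := max ((pos : Int) - 1) 0
      let a : Int := min (pos : Int) last
      d.insert p.1
        (if PySem.List.pyGetD keys b 0 + PySem.List.pyGetD keys a 0 < 2 * p.2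
         then PySem.List.pyGetD vals a 0 else PySem.List.pyGetD vals b 0))
    PySem.Dict.empty).items

-- ===== PRECONDITION & SPEC =====
-- Pre_ excludes (a) empty frame_times with nonempty mousecam_onsets, where A raises
-- IndexError (myList[0] on the empty key list; B raises IndexError there too), and
-- (b) association lists with duplicate keys, which no Python dict can produce.
def Pre_match_frames (mousecam_onsets : List Int) (frame_times : List (Int × Int)) : Prop :=
  (mousecam_onsets = [] ∨ frame_times ≠ []) ∧ (frame_times.map Prod.fst).Nodup
instance (mousecam_onsets : List Int) (frame_times : List (Int × Int)) : Decidable (Pre_match_frames mousecam_onsets frame_times) := by unfold Pre_match_frames; infer_instance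
def pvWitness_match_frames : List Int × (List (Int × Int)) := ([0, 5, 2], [(4, 20), (1, 10)])
def Spec_match_frames (mousecam_onsets : List Int) (frame_times : List (Int × Int)) (out : List (Int × Int)) : Prop := out = match_frames_alt mousecam_onsets frame_times
instance (mousecam_onsets : List Int) (frame_times : List (Int × Int)) (out : List (Int × Int)) : Decidable (Spec_match_frames mousecam_onsets frame_times out) := by unfold Spec_match_frames; infer_instance

-- ===== CLAIM (what is proved, stated in full; the proofs are below) =====
def Claim_equal_match_frames : Prop := ∀ (mousecam_onsets : List Int) (frame_times : List (Int × Int)), Dom_match_frames mousecam_onsets frame_times → Pre_match_frames mousecam_onsets frame_times → Spec_match_frames mousecam_onsets frame_times (match_frames mousecam_onsets frame_times)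

-- ===== LEMMAS AND PROOFS =====

-- the index into the key list that A's take_closest selects
def pvIdx (l : List Int) (t : Int) : Nat :=
  let pos := PySem.List.bisectLeft l t
  if pos = 0 then 0
  else if pos = l.length then l.length - 1
  else if (l[pos]?).getD 0 - t < t - (l[pos - 1]?).getD 0 then pos else pos - 1

theorem pvBisectLoop_bounds (xs : List Int) (x : Int) :
    ∀ (fuel lo hi : Nat), lo ≤ hi →
      lo ≤ PySem.List.bisectLeftLoop xs x fuel lo hi ∧ PySem.List.bisectLeftLoop xs x fuel lo hi ≤ hi := by
  intro fuel
  induction fuel with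
  | zero => intro lo hi h; simp [PySem.List.bisectLeftLoop]; omega
  | succ f ih =>
      intro lo hi h
      by_cases hlh : lo < hi
      · simp only [PySem.List.bisectLeftLoop, if_pos hlh]
        rcases hmid : xs[(lo + hi) / 2]? with _ | y
        · simp; omega
        · simp only []
          by_cases hy : y < x
          · rw [if_pos hy]
            have := ih ((lo + hi) / 2 + 1) hi (by omega)
            omega
          · rw [if_neg hy]
            have := ih lo ((lo + hi) / 2) (by omega)
            omega
      · simp only [PySem.List.bisectLeftLoop, if_neg hlh]; omega

theorem pvBisect_le (l : List Int) (t : Int) : PySem.List.bisectLeft l t ≤ l.length :=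
  (pvBisectLoop_bounds l t l.length 0 l.length (Nat.zero_le _)).2

theorem pvIdx_lt (l : List Int) (t : Int) (hne : l ≠ []) : pvIdx l t < l.length := by
  have hlen : 0 < l.length := List.length_pos_iff.mpr hne
  have hle := pvBisect_le l t
  unfold pvIdx
  dsimp only
  split_ifs <;> omega

theorem takeClosest_eq (l : List Int) (t : Int) (hne : l ≠ []) :
    takeClosest l t = some (l.getD (pvIdx l t) 0) := by
  have hlen : 0 < l.length := List.length_pos_iff.mpr hne
  have hle := pvBisect_le l t
  unfold takeClosest pvIdx
  set pos := PySem.List.bisectLeft l t with hpos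
  by_cases h0 : pos = 0
  · rw [if_pos h0, if_pos h0]
    simp only [PySem.List.pyGet?, PySem.List.pyIdx?]
    norm_num
    rw [if_pos (by exact_mod_cast hlen)]
    simp [List.getElem?_eq_getElem hlen]
  · by_cases hL : pos = l.length
    · rw [if_neg h0, if_neg h0, if_pos hL, if_pos hL]
      have hlast : l.length - 1 < l.length := by omega
      simp only [PySem.List.pyGet?, PySem.List.pyIdx?]
      rw [if_neg (by omega), if_pos (by omega)]
      simp [List.getD_eq_getElem?_getD, List.getElem?_eq_getElem hlast]
    · have hp1 : pos - 1 < l.length := by omega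
      have hpl : pos < l.length := by omega
      have hbefore : PySem.List.pyGet? l ((pos : Int) - 1) = some l[pos - 1] := by
        have hc : ((pos : Int) - 1) = ((pos - 1 : Nat) : Int) := by omega
        rw [hc, PySem.List.pyGet?_natCast]
        simp [List.getElem?_eq_getElem hp1]
      have hafter : PySem.List.pyGet? l (pos : Int) = some l[pos] := by
        rw [PySem.List.pyGet?_natCast]
        simp [List.getElem?_eq_getElem hpl]
      rw [if_neg h0, if_neg h0, if_neg hL, if_neg hL, hbefore, hafter]
      have hbv : (l[pos - 1]?).getD 0 = l[pos - 1] := by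
        simp [List.getElem?_eq_getElem hp1]
      have hav : (l[pos]?).getD 0 = l[pos] := by
        simp [List.getElem?_eq_getElem hpl]
      rw [hbv, hav]
      show (if l[pos] - t < t - l[pos - 1] then some l[pos] else some l[pos - 1])
          = some (l.getD (if l[pos] - t < t - l[pos - 1] then pos else pos - 1) 0)
      by_cases hc : l[pos] - t < t - l[pos - 1]
      · rw [if_pos hc, if_pos hc]
        simp [List.getD_eq_getElem?_getD, List.getElem?_eq_getElem hpl]
      · rw [if_neg hc, if_neg hc]
        simp [List.getD_eq_getElem?_getD, List.getElem?_eq_getElem hp1]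

-- B's recursive lower-bound search computes exactly the bisect_left loop's result
theorem lowerRec_eq_loop (l : List Int) (t : Int) :
    ∀ (fuel lo hi : Nat), hi ≤ l.length → hi - lo ≤ fuel →
      PySem.List.bisectLeftLoop l t fuel lo hi = lowerRec l t lo hi := by
  intro fuel
  induction fuel with
  | zero =>
      intro lo hi _ hf
      have : ¬ lo < hi := by omega
      rw [lowerRec, dif_neg this]
      simp [PySem.List.bisectLeftLoop]
  | succ f ih =>
      intro lo hi hlen hf
      by_cases hlh : lo < hi
      · have hmid : (lo + hi) / 2 < l.length := by omega
        have hget : l[(lo + hi) / 2]? = some l[(lo + hi) / 2] :=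
          List.getElem?_eq_getElem hmid
        have hgetD : l.getD ((lo + hi) / 2) 0 = l[(lo + hi) / 2] := by
          simp [List.getD_eq_getElem?_getD, hget]
        rw [lowerRec, dif_pos hlh]
        simp only [PySem.List.bisectLeftLoop, if_pos hlh, hget, hgetD]
        by_cases hy : l[(lo + hi) / 2] < t
        · rw [if_pos hy, if_pos hy, ih ((lo + hi) / 2 + 1) hi hlen (by omega)]
        · rw [if_neg hy, if_neg hy, ih lo ((lo + hi) / 2) (by omega) (by omega)]
      · rw [lowerRec, dif_neg hlh]
        simp [PySem.List.bisectLeftLoop, hlh]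

theorem lowerRec_eq_bisect (l : List Int) (t : Int) :
    lowerRec l t 0 l.length = PySem.List.bisectLeft l t :=
  (lowerRec_eq_loop l t l.length 0 l.length le_rfl (by omega)).symm

-- B's branch-free clamped midpoint selection picks exactly A's selected index
theorem pvSel_eq (l : List Int) (t : Int) (hne : l ≠ []) :
    (if PySem.List.pyGetD l (max ((PySem.List.bisectLeft l t : Int) - 1) 0) 0
        + PySem.List.pyGetD l (min ((PySem.List.bisectLeft l t : Int)) ((l.length : Int) - 1)) 0
        < 2 * t
     then min ((PySem.List.bisectLeft l t : Int)) ((l.length : Int) - 1)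
     else max ((PySem.List.bisectLeft l t : Int) - 1) 0) = (pvIdx l t : Int) := by
  have hlen : 0 < l.length := List.length_pos_iff.mpr hne
  have hle := pvBisect_le l t
  unfold pvIdx
  set pos := PySem.List.bisectLeft l t with hpos
  by_cases h0 : pos = 0
  · rw [if_pos h0]
    have hb : max ((pos : Int) - 1) 0 = ((0 : Nat) : Int) := by omega
    have ha : min ((pos : Int)) ((l.length : Int) - 1) = ((0 : Nat) : Int) := by omega
    rw [hb, ha]
    split_ifs <;> simp
  · by_cases hL : pos = l.length
    · rw [if_neg h0, if_pos hL]
      have hb : max ((pos : Int) - 1) 0 = ((l.length - 1 : Nat) : Int) := by omega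
      have ha : min ((pos : Int)) ((l.length : Int) - 1) = ((l.length - 1 : Nat) : Int) := by
        omega
      rw [hb, ha]
      split_ifs <;> rfl
    · have hp1 : pos - 1 < l.length := by omega
      have hpl : pos < l.length := by omega
      have hb : max ((pos : Int) - 1) 0 = ((pos - 1 : Nat) : Int) := by omega
      have ha : min ((pos : Int)) ((l.length : Int) - 1) = ((pos : Nat) : Int) := by omega
      rw [if_neg h0, if_neg hL, hb, ha, PySem.List.pyGetD_natCast, PySem.List.pyGetD_natCast]
      have hbv : l.getD (pos - 1) 0 = l[pos - 1] := by
        simp [List.getD_eq_getElem?_getD, List.getElem?_eq_getElem hp1]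
      have hav : l.getD pos 0 = l[pos] := by
        simp [List.getD_eq_getElem?_getD, List.getElem?_eq_getElem hpl]
      have hbv' : (l[pos - 1]?).getD 0 = l[pos - 1] := by
        simp [List.getElem?_eq_getElem hp1]
      have hav' : (l[pos]?).getD 0 = l[pos] := by
        simp [List.getElem?_eq_getElem hpl]
      rw [hbv, hav, hbv', hav']
      by_cases hc : l[pos] - t < t - l[pos - 1]
      · rw [if_pos (by omega), if_pos hc]
      · rw [if_neg (by omega), if_neg hc]

-- the dict lookup at the selected key is the positional read of the values list
theorem pvDict_getD_idx (fts : List (Int × Int)) (k : Nat) (hk : k < fts.length)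
    (hnd : (fts.map Prod.fst).Nodup) :
    (PySem.Dict.mk fts).getD ((fts.map Prod.fst).getD k 0) 0 = (fts.map Prod.snd).getD k 0 := by
  have hk1 : k < (fts.map Prod.fst).length := by simpa using hk
  have hk2 : k < (fts.map Prod.snd).length := by simpa using hk
  rw [List.getD_eq_getElem?_getD, List.getElem?_eq_getElem hk1,
      List.getD_eq_getElem?_getD, List.getElem?_eq_getElem hk2]
  simp only [Option.getD_some, List.getElem_map]
  have hmem : (fts[k].1, fts[k].2) ∈ (PySem.Dict.mk fts).items :=
    show (fts[k].1, fts[k].2) ∈ fts from (by simp)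
  have hnd' : (PySem.Dict.mk fts).keys.Nodup := by simpa [PySem.Dict.keys] using hnd
  exact PySem.Dict.getD_of_mem_items _ hmem hnd' 0

theorem match_frames_eq (mousecam_onsets : List Int) (frame_times : List (Int × Int))
    (hp : Pre_match_frames mousecam_onsets frame_times) :
    match_frames mousecam_onsets frame_times = match_frames_alt mousecam_onsets frame_times := by
  obtain ⟨hor, hnd⟩ := hp
  rcases hor with hms | hfts
  · subst hms; rfl
  · have hne : (PySem.Dict.mk frame_times).keys ≠ [] := by
      simp [PySem.Dict.keys, List.map_eq_nil_iff, hfts]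
    unfold match_frames match_frames_alt
    dsimp only
    rw [PySem.List.enumerate_eq_map_pyRange (d := 0), List.foldl_map]
    congr 1
    apply PySem.List.foldl_congr_mem
    intro d i _
    set keys := (PySem.Dict.mk frame_times).keys with hkeys
    set t := PySem.List.pyGetD mousecam_onsets i 0 with ht
    rw [takeClosest_eq _ _ hne]
    dsimp only
    congr 1
    rw [lowerRec_eq_bisect]
    rw [← apply_ite (fun j => PySem.List.pyGetD (PySem.Dict.values (PySem.Dict.mk frame_times)) j 0)]
    rw [pvSel_eq _ _ hne, PySem.List.pyGetD_natCast]
    have hlt : pvIdx keys t < frame_times.length := by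
      simpa [hkeys, PySem.Dict.keys] using pvIdx_lt keys t hne
    have := pvDict_getD_idx frame_times (pvIdx keys t) hlt hnd
    simpa [hkeys, PySem.Dict.keys, PySem.Dict.values, List.getD_eq_getElem?_getD] using this

-- ===== VERDICT (by name: the statement is the Claim_ definition above) =====
theorem match_frames_spec : Claim_equal_match_frames := by
  intro ms fts _ hp
  exact match_frames_eq ms fts hp
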